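-- pv_equiv track=rewrite | github.com/timholds/3b1b_dataset | scripts/systematic_api_fixer.py | _fix_property_methods
-- ===== SOURCE A (Python) =====
-- from typing import List, Dict, Tuple, Optional, Set, Any
--
-- PROPERTY_CONVERSIONS = {
--     'get_width': 'width',
--     'get_height': 'height',
--     'get_points': 'points',
--     'get_num_points': 'len(self.points)',  # Direct length
--     'get_x': 'x',
--     'get_y': 'y',
--     'get_z': 'z',
--     'get_tex_string': 'tex_string',
--     'get_fill_color': 'fill_color',
--     'get_stroke_color': 'stroke_color',
--     'get_stroke_width': 'stroke_width',
--     'get_fill_opacity': 'fill_opacity',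
--     'get_stroke_opacity': 'stroke_opacity',
--     'get_color': 'color',
--     'get_opacity': 'opacity',
--     'get_center': 'get_center',  # Still a method in ManimCE
--     'get_boundary': 'get_boundary',  # Still a method in ManimCE
-- }
--
-- def _fix_property_methods(code: str) -> Tuple[str, List[str]]:
--     """Convert get_* methods to properties where appropriate."""
--     fixes = []
--     fixed_code = code
--
--     for method, property_name in PROPERTY_CONVERSIONS.items():
--         pattern = f'.{method}()'
--         if pattern in fixed_code:
--             if property_name.startswith('len('):
--                 # Special handling for get_num_points
--                 replacement = f'.{property_name}'
--             else:
--                 replacement = f'.{property_name}'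
--             fixed_code = fixed_code.replace(pattern, replacement)
--             fixes.append(f'Converted {method}() to {property_name}')
--
--     return fixed_code, fixes
-- ===== SOURCE B (Python) =====
-- PROPERTY_CONVERSIONS = {
--     'get_width': 'width',
--     'get_height': 'height',
--     'get_points': 'points',
--     'get_num_points': 'len(self.points)',  # Direct length
--     'get_x': 'x',
--     'get_y': 'y',
--     'get_z': 'z',
--     'get_tex_string': 'tex_string',
--     'get_fill_color': 'fill_color',
--     'get_stroke_color': 'stroke_color',
--     'get_stroke_width': 'stroke_width',
--     'get_fill_opacity': 'fill_opacity',
--     'get_stroke_opacity': 'stroke_opacity',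
--     'get_color': 'color',
--     'get_opacity': 'opacity',
--     'get_center': 'get_center',  # Still a method in ManimCE
--     'get_boundary': 'get_boundary',  # Still a method in ManimCE
-- }
--
-- def _fix_property_methods(code):
--     """Single left-to-right pass: at each position try every `.method()` pattern;
--     on a match emit the property replacement and skip past the call, else copy the char."""
--     pats = [('.' + m + '()', '.' + p) for m, p in PROPERTY_CONVERSIONS.items()]
--     out = []
--     i = 0
--     n = len(code)
--     while i < n:
--         for pat, repl in pats:
--             if code.startswith(pat, i):
--                 out.append(repl)
--                 i += len(pat)
--                 break
--         else:
--             out.append(code[i])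
--             i += 1
--     fixes = ['Converted %s() to %s' % (m, p)
--              for m, p in PROPERTY_CONVERSIONS.items() if '.' + m + '()' in code]
--     return ''.join(out), fixes
-- ===== Notes on version B (the rewrite author's own statement) =====
-- stated objective: alternative
-- what changed: Replaces A's 17 sequential full-string str.replace passes (each rescanning the whole evolving string) by one left-to-right scan that substitutes whichever pattern matches at the current position, with the fixes list computed independently by membership tests on the original code.
import Mathlib
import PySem

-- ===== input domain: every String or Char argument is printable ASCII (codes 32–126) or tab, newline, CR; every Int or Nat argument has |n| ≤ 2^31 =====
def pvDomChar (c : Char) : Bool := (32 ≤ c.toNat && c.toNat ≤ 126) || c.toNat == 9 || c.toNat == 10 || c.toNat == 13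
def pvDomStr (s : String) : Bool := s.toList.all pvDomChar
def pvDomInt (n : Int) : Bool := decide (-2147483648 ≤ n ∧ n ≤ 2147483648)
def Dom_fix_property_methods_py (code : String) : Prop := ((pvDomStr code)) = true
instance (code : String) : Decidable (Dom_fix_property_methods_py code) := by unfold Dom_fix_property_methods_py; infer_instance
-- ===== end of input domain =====

-- B replaces A's 17 sequential full-string str.replace passes by one left-to-right scan that
-- substitutes the pattern matching at the current position (fixes computed from the original code);
-- an alternative single-traversal algorithm, not claimed faster.

-- ===== PORT A =====
-- PROPERTY_CONVERSIONS (dict with distinct keys → association list in insertion order)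
def pvConvs : List (String × String) :=
  [("get_width", "width"), ("get_height", "height"), ("get_points", "points"),
   ("get_num_points", "len(self.points)"), ("get_x", "x"), ("get_y", "y"), ("get_z", "z"),
   ("get_tex_string", "tex_string"), ("get_fill_color", "fill_color"),
   ("get_stroke_color", "stroke_color"), ("get_stroke_width", "stroke_width"),
   ("get_fill_opacity", "fill_opacity"), ("get_stroke_opacity", "stroke_opacity"),
   ("get_color", "color"), ("get_opacity", "opacity"), ("get_center", "get_center"),
   ("get_boundary", "get_boundary")]

def fix_property_methods_py (code : String) : String × List String :=
  pvConvs.foldl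
    (fun st mp =>
      let pattern := "." ++ mp.1 ++ "()"
      if PySem.Str.isIn pattern st.1 then
        let replacement :=
          if PySem.Str.startswith mp.2 "len(" then "." ++ mp.2 else "." ++ mp.2
        (PySem.Str.replace st.1 pattern replacement,
         st.2 ++ ["Converted " ++ mp.1 ++ "() to " ++ mp.2])
      else st)
    (code, [])

-- ===== PORT B =====
-- pats = [('.' + m + '()', '.' + p) for m, p in PROPERTY_CONVERSIONS.items()]
def pvPats : List (List Char × List Char) :=
  pvConvs.map (fun mp => (("." ++ mp.1 ++ "()").toList, ("." ++ mp.2).toList))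

-- the single left-to-right scan of Source B: at each position try every pattern, on a match emit the
-- replacement and jump past the matched call, else copy the character
def pvScan (ps : List (List Char × List Char)) : List Char → List Char
  | [] => []
  | c :: t =>
    match ps.find? (fun pr => pr.1.isPrefixOf (c :: t)) with
    | some pr => pr.2 ++ pvScan ps (t.drop (pr.1.length - 1))
    | none => c :: pvScan ps t
termination_by l => l.length
decreasing_by
  all_goals simp only [List.length_drop, List.length_cons]; omega

def fix_property_methods_py_alt (code : String) : String × List String :=
  (String.ofList (pvScan pvPats code.toList),
   (pvConvs.filter (fun mp => PySem.Str.isIn ("." ++ mp.1 ++ "()") code)).map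
     (fun mp => "Converted " ++ mp.1 ++ "() to " ++ mp.2))

-- ===== PRECONDITION & SPEC =====
def Spec_fix_property_methods_py (code : String) (out : String × List String) : Prop := out = fix_property_methods_py_alt code
instance (code : String) (out : String × List String) : Decidable (Spec_fix_property_methods_py code out) := by unfold Spec_fix_property_methods_py; infer_instance

-- ===== CLAIM (what is proved, stated in full; the proofs are below) =====
def Claim_equal_fix_property_methods_py : Prop := ∀ (code : String), Dom_fix_property_methods_py code → Spec_fix_property_methods_py code (fix_property_methods_py code)

-- ===== LEMMAS AND PROOFS =====

-- single-pattern left-to-right replacement (clean recursion equivalent of Chars.replace for old ≠ [])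
def pvRep (p r : List Char) : List Char → List Char
  | [] => []
  | c :: t =>
    if p <+: (c :: t) then r ++ pvRep p r (t.drop (p.length - 1)) else c :: pvRep p r t
termination_by l => l.length
decreasing_by
  all_goals simp only [List.length_drop, List.length_cons]; omega

-- sequential application of a list of (pattern, replacement) pairs = A's chain of str.replace
def pvSeq (ps : List (List Char × List Char)) (s : List Char) : List Char :=
  ps.foldl (fun s pr => pvRep pr.1 pr.2 s) s

-- 'p occurs as a substring' as a head recursion
def pvHas (p : List Char) : List Char → Bool
  | [] => false
  | c :: t => p.isPrefixOf (c :: t) || pvHas p t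

-- cOK q d = true  →  q cannot be a prefix of d ++ u for ANY u
def pvCOK (q d : List Char) : Bool :=
  if q.length ≤ d.length then !(q.isPrefixOf d) else !(d.isPrefixOf q)

lemma pvCOK_spec {q d : List Char} (h : pvCOK q d = true) (u : List Char) :
    ¬ q <+: d ++ u := by
  intro hq
  unfold pvCOK at h
  split at h
  · next hle =>
    have : q <+: d :=
      List.prefix_of_prefix_length_le hq (List.prefix_append d u) (by simpa using hle)
    rw [List.isPrefixOf_iff_prefix.mpr this] at h; simp at h
  · next hlt =>
    have : d <+: q :=
      List.prefix_of_prefix_length_le (List.prefix_append d u) hq (by omega)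
    rw [List.isPrefixOf_iff_prefix.mpr this] at h; simp at h

lemma pvRep_nil (p r : List Char) : pvRep p r [] = [] := by simp [pvRep]

lemma pvRep_cons_pos {p : List Char} (r : List Char) {c : Char} {t : List Char}
    (h : p <+: (c :: t)) :
    pvRep p r (c :: t) = r ++ pvRep p r (t.drop (p.length - 1)) := by
  rw [pvRep]; simp [h]

lemma pvRep_cons_neg {p : List Char} (r : List Char) {c : Char} {t : List Char}
    (h : ¬ p <+: (c :: t)) :
    pvRep p r (c :: t) = c :: pvRep p r t := by
  rw [pvRep]; simp [h]

lemma pvGo_spec (p r : List Char) (hp : p ≠ []) :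
    ∀ (fuel : Nat) (l acc : List Char), l.length ≤ fuel →
      PySem.Chars.replace.go p r fuel l acc = acc.reverse ++ pvRep p r l := by
  intro fuel
  induction fuel with
  | zero =>
    intro l acc hl
    have hnil : l = [] := by cases l <;> simp_all
    subst hnil
    simp [PySem.Chars.replace.go, pvRep_nil]
  | succ n ih =>
    intro l acc hl
    cases l with
    | nil => simp [PySem.Chars.replace.go, pvRep_nil]
    | cons c t =>
      obtain ⟨pc, pt, rfl⟩ : ∃ pc pt, p = pc :: pt := by
        cases p with
        | nil => exact absurd rfl hp
        | cons a b => exact ⟨a, b, rfl⟩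
      by_cases hpre : (pc :: pt) <+: (c :: t)
      · have hb : (pc :: pt).isPrefixOf (c :: t) = true := List.isPrefixOf_iff_prefix.mpr hpre
        have hlen : pt.length ≤ t.length := by
          have := hpre.length_le; simpa using this
        rw [PySem.Chars.replace.go]
        simp only [hb, if_true]
        have hdrop : (c :: t).drop (pc :: pt).length = t.drop pt.length := by
          simp [List.drop_succ_cons]
        rw [hdrop, ih (t.drop pt.length) (r.reverse ++ acc)
          (by have := hl; simp at this ⊢; omega)]
        rw [pvRep_cons_pos r hpre]
        simp [List.reverse_append]
      · have hb : (pc :: pt).isPrefixOf (c :: t) = false := by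
          rw [← Bool.not_eq_true, List.isPrefixOf_iff_prefix]; exact hpre
        rw [PySem.Chars.replace.go]
        simp only [hb, Bool.false_eq_true, if_false]
        rw [ih t (c :: acc) (by simpa using Nat.le_of_succ_le_succ hl)]
        rw [pvRep_cons_neg r hpre]
        simp

lemma pvReplace_eq_rep (p r : List Char) (hp' : p ≠ []) (s : List Char) :
    PySem.Chars.replace s p r = pvRep p r s := by
  rw [PySem.Chars.replace]
  have : p.isEmpty = false := by cases p <;> simp_all
  rw [this]
  simpa using pvGo_spec p r hp' s.length s [] (le_refl _)

lemma pvHas_iff (p : List Char) (hp : p ≠ []) (s : List Char) :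
    pvHas p s = true ↔ ∃ j, p <+: s.drop j := by
  induction s with
  | nil =>
    simp only [pvHas, List.drop_nil]
    constructor
    · intro h; exact absurd h (by simp)
    · rintro ⟨j, hj⟩
      exact absurd (List.prefix_nil.mp hj) hp
  | cons c t ih =>
    simp only [pvHas, Bool.or_eq_true, List.isPrefixOf_iff_prefix, ih]
    constructor
    · rintro (h | ⟨j, hj⟩)
      · exact ⟨0, by simpa using h⟩
      · exact ⟨j + 1, by simpa using hj⟩
    · rintro ⟨j, hj⟩
      cases j with
      | zero => exact Or.inl (by simpa using hj)
      | succ j => exact Or.inr ⟨j, by simpa using hj⟩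

lemma pvIsIn_eq_has (p s : List Char) (hp : p ≠ []) :
    PySem.Chars.isIn p s = pvHas p s := by
  cases hb : pvHas p s with
  | true =>
    obtain ⟨j, hj⟩ := (pvHas_iff p hp s).mp hb
    exact (PySem.Chars.exists_prefix_drop_iff_isIn p s).mp ⟨j, hj⟩
  | false =>
    cases hi : PySem.Chars.isIn p s with
    | false => rfl
    | true =>
      obtain ⟨j, hj⟩ := (PySem.Chars.exists_prefix_drop_iff_isIn p s).mpr hi
      have := (pvHas_iff p hp s).mpr ⟨j, hj⟩
      simp [hb] at this

lemma pvRep_protect (p r d : List Char)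
    (hd : ∀ i, i < d.length → pvCOK p (d.drop i) = true) :
    ∀ u, pvRep p r (d ++ u) = d ++ pvRep p r u := by
  induction d with
  | nil => intro u; simp
  | cons c d' ih =>
    intro u
    have h0 : ¬ p <+: (c :: d') ++ u := pvCOK_spec (by simpa using hd 0 (by simp)) u
    rw [List.cons_append, pvRep_cons_neg r (by simpa using h0)]
    rw [show d' ++ u = d' ++ u from rfl]
    rw [ih (fun i hi => by simpa using hd (i + 1) (by simpa using Nat.succ_lt_succ hi)) u,
      List.cons_append]

lemma pvHas_protect (q d : List Char)
    (hd : ∀ i, i < d.length → pvCOK q (d.drop i) = true) :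
    ∀ u, pvHas q (d ++ u) = pvHas q u := by
  induction d with
  | nil => intro u; simp
  | cons c d' ih =>
    intro u
    have h0 : ¬ q <+: (c :: d') ++ u := pvCOK_spec (by simpa using hd 0 (by simp)) u
    rw [List.cons_append]
    simp only [pvHas]
    rw [List.cons_append] at h0
    have hb : q.isPrefixOf (c :: (d' ++ u)) = false := by
      rw [← Bool.not_eq_true, List.isPrefixOf_iff_prefix]; exact h0
    rw [hb]
    exact ih (fun i hi => by simpa using hd (i + 1) (by simpa using Nat.succ_lt_succ hi)) u

lemma pvRep_nodot (p r : List Char) (_hp : p.head? = some '.') (hr : r.head? = some '.') :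
    ∀ (w : List Char), w.contains '.' = false →
      ∀ u, ¬ w <+: u → ¬ w <+: pvRep p r u := by
  suffices h : ∀ (n : Nat) (u w : List Char), u.length ≤ n → w.contains '.' = false →
      ¬ w <+: u → ¬ w <+: pvRep p r u by
    intro w hw u hu; exact h u.length u w (le_refl _) hw hu
  intro n
  induction n with
  | zero =>
    intro u w hl hw hu
    have : u = [] := by cases u <;> simp_all
    subst this; simpa [pvRep_nil] using hu
  | succ n ih =>
    intro u w hl hw hu
    obtain ⟨a, w', rfl⟩ : ∃ a w', w = a :: w' := by
      cases w with
      | nil => exact absurd (List.nil_prefix) hu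
      | cons a b => exact ⟨a, b, rfl⟩
    have ha : a ≠ '.' := by
      intro h; subst h; simp at hw
    cases u with
    | nil => simp only [pvRep_nil]; exact hu
    | cons c t =>
      by_cases hpre : p <+: (c :: t)
      · rw [pvRep_cons_pos r hpre]
        obtain ⟨rc, rt, rfl⟩ : ∃ rc rt, r = rc :: rt := by
          cases r with
          | nil => simp at hr
          | cons x y => exact ⟨x, y, rfl⟩
        have hrc : rc = '.' := by simpa using hr
        intro hcon
        rw [List.cons_append] at hcon
        have := (List.cons_prefix_cons.mp hcon).1
        exact ha (this.trans hrc)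
      · rw [pvRep_cons_neg r hpre]
        intro hcon
        obtain ⟨hac, hw'⟩ := List.cons_prefix_cons.mp hcon
        have hwt : ¬ w' <+: t := by
          intro h
          exact hu (List.cons_prefix_cons.mpr ⟨hac, h⟩)
        exact ih t w' (by simpa using Nat.le_of_succ_le_succ hl)
          (by simp at hw ⊢; tauto) hwt hw'

lemma pvRep_id (p r : List Char) : ∀ u, pvHas p u = false → pvRep p r u = u := by
  intro u
  induction u with
  | nil => intro _; exact pvRep_nil p r
  | cons c t ih =>
    intro h
    simp only [pvHas, Bool.or_eq_false_iff] at h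
    have h1 : ¬ p <+: (c :: t) := by
      intro hpp; rw [List.isPrefixOf_iff_prefix.mpr hpp] at h; simp at h
    rw [pvRep_cons_neg r h1, ih h.2]

lemma pvSeq_nil (ps : List (List Char × List Char)) : pvSeq ps [] = [] := by
  induction ps with
  | nil => rfl
  | cons pr rest ih => simp only [pvSeq, List.foldl_cons, pvRep_nil]; exact ih

lemma pvSeq_append (a b : List (List Char × List Char)) (s : List Char) :
    pvSeq (a ++ b) s = pvSeq b (pvSeq a s) := by
  simp [pvSeq, List.foldl_append]

lemma pvSeq_protect (ps : List (List Char × List Char)) (d : List Char)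
    (h : ∀ pr ∈ ps, ∀ u, pvRep pr.1 pr.2 (d ++ u) = d ++ pvRep pr.1 pr.2 u) :
    ∀ u, pvSeq ps (d ++ u) = d ++ pvSeq ps u := by
  induction ps with
  | nil => intro u; rfl
  | cons pr rest ih =>
    intro u
    have hstep : ∀ s, pvSeq (pr :: rest) s = pvSeq rest (pvRep pr.1 pr.2 s) := fun s => rfl
    rw [hstep, hstep, h pr (by simp) u]
    exact ih (fun q hq u' => h q (by simp [hq]) u') (pvRep pr.1 pr.2 u)

lemma pvStep_nomatch (ps : List (List Char × List Char))
    (hH : ∀ pr ∈ ps, pr.1.head? = some '.' ∧ pr.2.head? = some '.' ∧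
            pr.1.tail.contains '.' = false) (c : Char) :
    ∀ t, (∀ pr ∈ ps, ¬ pr.1 <+: c :: t) → pvSeq ps (c :: t) = c :: pvSeq ps t := by
  induction ps with
  | nil => intro t _; rfl
  | cons pr rest ih =>
    intro t hm
    have hstep : ∀ s, pvSeq (pr :: rest) s = pvSeq rest (pvRep pr.1 pr.2 s) := fun s => rfl
    rw [hstep, hstep, pvRep_cons_neg pr.2 (hm pr (by simp))]
    have hnext : ∀ q ∈ rest, ¬ q.1 <+: c :: pvRep pr.1 pr.2 t := by
      intro q hq hcon
      obtain ⟨qc, qw, hq1⟩ : ∃ qc qw, q.1 = qc :: qw := by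
        rcases hqh : q.1 with _ | ⟨x, y⟩
        · have := (hH q (by simp [hq])).1; simp [hqh] at this
        · exact ⟨x, y, rfl⟩
      have hqc : qc = '.' := by
        have := (hH q (by simp [hq])).1; rw [hq1] at this; simpa using this
      have hqw : qw.contains '.' = false := by
        have := (hH q (by simp [hq])).2.2; rw [hq1] at this; simpa using this
      rw [hq1] at hcon
      obtain ⟨hc1, hc2⟩ := List.cons_prefix_cons.mp hcon
      have horig : ¬ q.1 <+: c :: t := hm q (by simp [hq])
      rw [hq1] at horig
      have hwt : ¬ qw <+: t := fun hh => horig (List.cons_prefix_cons.mpr ⟨hc1, hh⟩)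
      exact pvRep_nodot pr.1 pr.2 (hH pr (by simp)).1 (hH pr (by simp)).2.1 qw hqw t hwt hc2
    rw [ih (fun q hq => hH q (by simp [hq])) (pvRep pr.1 pr.2 t) hnext]

lemma pvRep_self_prefix (p r : List Char) (hp : p ≠ []) (X : List Char) :
    pvRep p r (p ++ X) = r ++ pvRep p r X := by
  obtain ⟨pc, pt, rfl⟩ : ∃ pc pt, p = pc :: pt := by
    cases p with
    | nil => exact absurd rfl hp
    | cons a b => exact ⟨a, b, rfl⟩
  rw [List.cons_append, pvRep_cons_pos r (by rw [← List.cons_append]; exact List.prefix_append _ _)]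
  simp

lemma pvStep_match (l₁ l₂ : List (List Char × List Char)) (pr : List Char × List Char)
    (hL : ∀ q ∈ l₁, ∀ i, i < pr.1.length → pvCOK q.1 (pr.1.drop i) = true)
    (hR : ∀ q ∈ l₂, ∀ i, i < pr.2.length → pvCOK q.1 (pr.2.drop i) = true)
    (hpr : pr.1 ≠ []) (u : List Char) :
    pvSeq (l₁ ++ pr :: l₂) (pr.1 ++ u) = pr.2 ++ pvSeq (l₁ ++ pr :: l₂) u := by
  have hcons : ∀ s, pvSeq (pr :: l₂) s = pvSeq l₂ (pvRep pr.1 pr.2 s) := by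
    intro s; simp [pvSeq, List.foldl_cons]
  have e1 : ∀ v, pvSeq l₁ (pr.1 ++ v) = pr.1 ++ pvSeq l₁ v :=
    pvSeq_protect l₁ pr.1 (fun q hq v => pvRep_protect q.1 q.2 pr.1 (hL q hq) v)
  have e3 : ∀ v, pvSeq l₂ (pr.2 ++ v) = pr.2 ++ pvSeq l₂ v :=
    pvSeq_protect l₂ pr.2 (fun q hq v => pvRep_protect q.1 q.2 pr.2 (hR q hq) v)
  rw [pvSeq_append, pvSeq_append, hcons, hcons, e1,
    pvRep_self_prefix pr.1 pr.2 hpr (pvSeq l₁ u), e3]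

-- hypotheses under which one earlier replace step preserves occurrence of a later pattern q
def pvPresHyp (pr : List Char × List Char) (q : List Char) : Prop :=
  (∀ i, i < q.length → pvCOK pr.1 (q.drop i) = true) ∧
  (∀ i, i < pr.1.length → pvCOK q (pr.1.drop i) = true) ∧
  (∀ i, i < pr.2.length → pvCOK q (pr.2.drop i) = true) ∧
  pr.1.head? = some '.' ∧ pr.2.head? = some '.'

lemma pvHas_self_prefix (q : List Char) (hq : q ≠ []) (X : List Char) :
    pvHas q (q ++ X) = true := by
  obtain ⟨qc, qt, rfl⟩ : ∃ qc qt, q = qc :: qt := by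
    cases q with
    | nil => exact absurd rfl hq
    | cons a b => exact ⟨a, b, rfl⟩
  rw [List.cons_append]
  simp only [pvHas, Bool.or_eq_true, List.isPrefixOf_iff_prefix]
  exact Or.inl (by rw [← List.cons_append]; exact List.prefix_append _ _)

lemma pvHas_pres (pr : List Char × List Char) (q : List Char)
    (hq1 : q ≠ []) (hq2 : q.head? = some '.') (hq3 : q.tail.contains '.' = false)
    (hh : pvPresHyp pr q) :
    ∀ u, pvHas q (pvRep pr.1 pr.2 u) = pvHas q u := by
  obtain ⟨h1, h2, h3, h4, h5⟩ := hh
  have hprne : pr.1 ≠ [] := by intro h; rw [h] at h4; simp at h4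
  suffices h : ∀ (n : Nat) (u : List Char), u.length ≤ n →
      pvHas q (pvRep pr.1 pr.2 u) = pvHas q u by
    intro u; exact h u.length u (le_refl _)
  intro n
  induction n with
  | zero =>
    intro u hl
    have : u = [] := by cases u <;> simp_all
    subst this; rw [pvRep_nil]
  | succ n ih =>
    intro u hl
    by_cases hqu : q <+: u
    · obtain ⟨v, rfl⟩ := hqu
      rw [pvRep_protect pr.1 pr.2 q h1 v, pvHas_self_prefix q hq1,
        pvHas_self_prefix q hq1]
    · by_cases hpu : pr.1 <+: u
      · obtain ⟨u', rfl⟩ := hpu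
        rw [pvRep_self_prefix pr.1 pr.2 hprne u']
        rw [pvHas_protect q pr.2 h3, pvHas_protect q pr.1 h2]
        exact ih u' (by
          have := hl
          rw [List.length_append] at this
          have hp1 : 0 < pr.1.length := List.length_pos_of_ne_nil hprne
          omega)
      · cases u with
        | nil => rw [pvRep_nil]
        | cons c t =>
          rw [pvRep_cons_neg pr.2 hpu]
          simp only [pvHas]
          obtain ⟨qc, qw, rfl⟩ : ∃ qc qw, q = qc :: qw := by
            cases q with
            | nil => exact absurd rfl hq1
            | cons a b => exact ⟨a, b, rfl⟩
          have hqc : qc = '.' := by simpa using hq2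
          have hqw : qw.contains '.' = false := by simpa using hq3
          have hpre1 : (qc :: qw).isPrefixOf (c :: pvRep pr.1 pr.2 t) = false := by
            rw [← Bool.not_eq_true, List.isPrefixOf_iff_prefix]
            intro hcon
            obtain ⟨hc1, hc2⟩ := List.cons_prefix_cons.mp hcon
            have hwt : ¬ qw <+: t := fun hh =>
              hqu (List.cons_prefix_cons.mpr ⟨hc1, hh⟩)
            exact pvRep_nodot pr.1 pr.2 h4 h5 qw hqw t hwt hc2
          have hpre2 : (qc :: qw).isPrefixOf (c :: t) = false := by
            rw [← Bool.not_eq_true, List.isPrefixOf_iff_prefix]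
            exact hqu
          rw [hpre1, hpre2, ih t (by simpa using Nat.le_of_succ_le_succ hl)]

lemma pvHas_seq_pres (l : List (List Char × List Char)) (q : List Char)
    (hq1 : q ≠ []) (hq2 : q.head? = some '.') (hq3 : q.tail.contains '.' = false)
    (hh : ∀ pr ∈ l, pvPresHyp pr q) :
    ∀ u, pvHas q (pvSeq l u) = pvHas q u := by
  induction l with
  | nil => intro u; rfl
  | cons pr rest ih =>
    intro u
    have hstep : ∀ s, pvSeq (pr :: rest) s = pvSeq rest (pvRep pr.1 pr.2 s) := fun s => rfl
    rw [hstep, ih (fun p hp => hh p (by simp [hp])) (pvRep pr.1 pr.2 u)]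
    exact pvHas_pres pr q hq1 hq2 hq3 (hh pr (by simp)) u

-- ===== decidable facts about the concrete pattern table =====
lemma pvF1 : ∀ pr ∈ pvPats, pr.1 ≠ [] ∧ pr.1.head? = some '.' ∧ pr.2.head? = some '.' ∧
    pr.1.tail.contains '.' = false := by decide

lemma pvF2 : ∀ pr ∈ pvPats, ∀ qr ∈ pvPats, pr.1 ≠ qr.1 → pvCOK qr.1 pr.1 = true := by decide

lemma pvF3 : ∀ pr ∈ pvPats, ∀ qr ∈ pvPats, ∀ i, i < pr.1.length → 0 < i →
    pvCOK qr.1 (pr.1.drop i) = true := by decide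

lemma pvF3' : ∀ pr ∈ pvPats, ∀ qr ∈ pvPats, ∀ i, i < pr.2.length → 0 < i →
    pvCOK qr.1 (pr.2.drop i) = true := by decide

lemma pvF4 : List.Pairwise (fun a b => pvCOK b.1 a.2 = true) pvPats := by decide

lemma pvF5 : (pvPats.map Prod.fst).Nodup := by decide

-- ===== main equivalence: sequential = single scan =====
lemma pvScan_nil (ps : List (List Char × List Char)) : pvScan ps [] = [] := by
  simp [pvScan]

lemma pvScan_cons_some {ps : List (List Char × List Char)} {pr : List Char × List Char}
    {c : Char} {t : List Char}
    (h : ps.find? (fun pr => pr.1.isPrefixOf (c :: t)) = some pr) :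
    pvScan ps (c :: t) = pr.2 ++ pvScan ps (t.drop (pr.1.length - 1)) := by
  rw [pvScan, h]

lemma pvScan_cons_none {ps : List (List Char × List Char)} {c : Char} {t : List Char}
    (h : ps.find? (fun pr => pr.1.isPrefixOf (c :: t)) = none) :
    pvScan ps (c :: t) = c :: pvScan ps t := by
  rw [pvScan, h]

lemma pvSeq_eq_scan : ∀ s : List Char, pvSeq pvPats s = pvScan pvPats s := by
  suffices h : ∀ (n : Nat) (s : List Char), s.length ≤ n →
      pvSeq pvPats s = pvScan pvPats s by
    intro s; exact h s.length s (le_refl _)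
  intro n
  induction n with
  | zero =>
    intro s hs
    have : s = [] := by cases s <;> simp_all
    subst this; rw [pvSeq_nil, pvScan_nil]
  | succ n ih =>
    intro s hs
    cases s with
    | nil => rw [pvSeq_nil, pvScan_nil]
    | cons c t =>
      cases hfind : pvPats.find? (fun pr => pr.1.isPrefixOf (c :: t)) with
      | none =>
        have hno : ∀ pr ∈ pvPats, ¬ pr.1 <+: c :: t := by
          intro pr hpr hcon
          have := List.find?_eq_none.mp hfind pr hpr
          exact this (List.isPrefixOf_iff_prefix.mpr hcon)
        rw [pvStep_nomatch pvPats
            (fun pr hpr => ⟨(pvF1 pr hpr).2.1, (pvF1 pr hpr).2.2.1, (pvF1 pr hpr).2.2.2⟩)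
            c t hno,
          ih t (by simpa using Nat.le_of_succ_le_succ hs), pvScan_cons_none hfind]
      | some pr =>
        have hmem : pr ∈ pvPats := List.mem_of_find?_eq_some hfind
        have hpre : pr.1 <+: c :: t := List.isPrefixOf_iff_prefix.mp (List.find?_some (p := fun pr : List Char × List Char => pr.1.isPrefixOf (c :: t)) hfind)
        obtain ⟨u, hu⟩ := hpre
        have hprne : pr.1 ≠ [] := (pvF1 pr hmem).1
        obtain ⟨pc, pt, hp⟩ : ∃ pc pt, pr.1 = pc :: pt := by
          cases hpp : pr.1 with
          | nil => exact absurd hpp hprne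
          | cons a b => exact ⟨a, b, rfl⟩
        obtain ⟨l₁, l₂, hsplit⟩ := List.mem_iff_append.mp hmem
        have hnd := pvF5
        rw [hsplit, List.map_append, List.map_cons, List.nodup_append] at hnd
        have hp4 := pvF4
        rw [hsplit] at hp4
        have hafter : ∀ q ∈ l₂, pvCOK q.1 pr.2 = true :=
          fun q hq => (List.pairwise_cons.mp (List.pairwise_append.mp hp4).2.1).1 q hq
        have hL : ∀ q ∈ l₁, ∀ i, i < pr.1.length → pvCOK q.1 (pr.1.drop i) = true := by
          intro q hq i hi
          have hqmem : q ∈ pvPats := by rw [hsplit]; exact List.mem_append_left _ hq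
          rcases Nat.eq_zero_or_pos i with h0 | hpos
          · subst h0
            have hne : pr.1 ≠ q.1 := by
              intro he
              have hq1 : q.1 ∈ List.map Prod.fst l₁ := List.mem_map.mpr ⟨q, hq, rfl⟩
              exact hnd.2.2 q.1 hq1 pr.1 (by simp) he.symm
            simpa using pvF2 pr hmem q hqmem hne
          · exact pvF3 pr hmem q hqmem i hi hpos
        have hR : ∀ q ∈ l₂, ∀ i, i < pr.2.length → pvCOK q.1 (pr.2.drop i) = true := by
          intro q hq i hi
          have hqmem : q ∈ pvPats := by
            rw [hsplit]; exact List.mem_append_right _ (by simp [hq])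
          rcases Nat.eq_zero_or_pos i with h0 | hpos
          · subst h0; simpa using hafter q hq
          · exact pvF3' pr hmem q hqmem i hi hpos
        have hstep := pvStep_match l₁ l₂ pr hL hR hprne u
        rw [← hsplit] at hstep
        have htu : pt ++ u = t := by
          rw [hp, List.cons_append] at hu
          exact (List.cons.injEq _ _ _ _ ▸ hu : _ ∧ _).2
        have hdropu : t.drop (pr.1.length - 1) = u := by
          rw [hp, ← htu]; simp
        have hlen : u.length ≤ n := by
          have h1 := congrArg List.length hu
          rw [List.length_append] at h1
          have h2 : 0 < pr.1.length := List.length_pos_of_ne_nil hprne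
          simp at h1 hs
          omega
        rw [pvScan_cons_some hfind, hdropu, ← hu, hstep, ih u hlen]

-- ===== A's fold characterisation =====
def pvCPat (mp : String × String) : List Char := ("." ++ mp.1 ++ "()").toList
def pvCRep (mp : String × String) : List Char := ("." ++ mp.2).toList
def pvToPats (l : List (String × String)) : List (List Char × List Char) :=
  l.map (fun mp => (pvCPat mp, pvCRep mp))
def pvTag (mp : String × String) : String := "Converted " ++ mp.1 ++ "() to " ++ mp.2
def pvStepA (st : String × List String) (mp : String × String) : String × List String :=
  let pattern := "." ++ mp.1 ++ "()"
  if PySem.Str.isIn pattern st.1 then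
    let replacement :=
      if PySem.Str.startswith mp.2 "len(" then "." ++ mp.2 else "." ++ mp.2
    (PySem.Str.replace st.1 pattern replacement,
     st.2 ++ ["Converted " ++ mp.1 ++ "() to " ++ mp.2])
  else st

lemma pvCPat_ne (mp : String × String) : pvCPat mp ≠ [] := by simp [pvCPat]

lemma pvFoldA_spec : ∀ (l₂ l₁ : List (String × String)), l₁ ++ l₂ = pvConvs →
    ∀ (s₀ : List Char) (acc : List String),
      List.foldl pvStepA (String.ofList (pvSeq (pvToPats l₁) s₀), acc) l₂
        = (String.ofList (pvSeq (pvToPats (l₁ ++ l₂)) s₀),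
           acc ++ (l₂.filter (fun mp => pvHas (pvCPat mp) s₀)).map pvTag) := by
  intro l₂
  induction l₂ with
  | nil => intro l₁ h s₀ acc; simp
  | cons mp rest ih =>
    intro l₁ hconv s₀ acc
    have hsplit : pvPats = pvToPats l₁ ++ (pvCPat mp, pvCRep mp) :: pvToPats rest := by
      rw [show pvPats = pvToPats pvConvs from rfl, ← hconv]
      simp [pvToPats, pvCPat, pvCRep]
    have hQmem : (pvCPat mp, pvCRep mp) ∈ pvPats := by rw [hsplit]; simp
    have hQ1 := pvF1 _ hQmem
    have hnd := pvF5
    rw [hsplit, List.map_append, List.map_cons, List.nodup_append] at hnd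
    have hp4 := pvF4; rw [hsplit] at hp4
    have hpres : ∀ pr ∈ pvToPats l₁, pvPresHyp pr (pvCPat mp) := by
      intro pr hpr
      have hprmem : pr ∈ pvPats := by rw [hsplit]; exact List.mem_append_left _ hpr
      have hne : pr.1 ≠ pvCPat mp := by
        intro he
        have h1 : pr.1 ∈ List.map Prod.fst (pvToPats l₁) := List.mem_map.mpr ⟨pr, hpr, rfl⟩
        exact hnd.2.2 pr.1 h1 (pvCPat mp) (by simp) he
      refine ⟨?_, ?_, ?_, (pvF1 pr hprmem).2.1, (pvF1 pr hprmem).2.2.1⟩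
      · intro i hi
        rcases Nat.eq_zero_or_pos i with h0 | hpos
        · subst h0; simpa using pvF2 _ hQmem pr hprmem (fun he => hne he.symm)
        · exact pvF3 _ hQmem pr hprmem i hi hpos
      · intro i hi
        rcases Nat.eq_zero_or_pos i with h0 | hpos
        · subst h0; simpa using pvF2 pr hprmem _ hQmem hne
        · exact pvF3 pr hprmem _ hQmem i hi hpos
      · intro i hi
        rcases Nat.eq_zero_or_pos i with h0 | hpos
        · subst h0
          have := (List.pairwise_append.mp hp4).2.2 pr hpr (pvCPat mp, pvCRep mp) (by simp)
          simpa using this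
        · exact pvF3' pr hprmem _ hQmem i hi hpos
    have hX : (String.ofList (pvSeq (pvToPats l₁) s₀)).toList = pvSeq (pvToPats l₁) s₀ :=
      String.toList_ofList
    have hcond : PySem.Str.isIn ("." ++ mp.1 ++ "()") (String.ofList (pvSeq (pvToPats l₁) s₀))
        = pvHas (pvCPat mp) s₀ := by
      show PySem.Chars.isIn ("." ++ mp.1 ++ "()").toList
        (String.ofList (pvSeq (pvToPats l₁) s₀)).toList = _
      rw [hX, show ("." ++ mp.1 ++ "()").toList = pvCPat mp from rfl,
        pvIsIn_eq_has _ _ (pvCPat_ne mp)]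
      exact pvHas_seq_pres (pvToPats l₁) (pvCPat mp) (pvCPat_ne mp) hQ1.2.1 hQ1.2.2.2 hpres _
    have hseqstep : pvSeq (pvToPats (l₁ ++ [mp])) s₀
        = pvRep (pvCPat mp) (pvCRep mp) (pvSeq (pvToPats l₁) s₀) := by
      rw [show pvToPats (l₁ ++ [mp]) = pvToPats l₁ ++ [(pvCPat mp, pvCRep mp)] by
        simp [pvToPats], pvSeq_append]
      rfl
    have hconv' : (l₁ ++ [mp]) ++ rest = pvConvs := by
      rw [List.append_assoc]; exact hconv
    rw [List.foldl_cons]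
    cases hc : pvHas (pvCPat mp) s₀ with
    | true =>
      have hstep : pvStepA (String.ofList (pvSeq (pvToPats l₁) s₀), acc) mp
          = (String.ofList (pvSeq (pvToPats (l₁ ++ [mp])) s₀), acc ++ [pvTag mp]) := by
        show (if PySem.Str.isIn ("." ++ mp.1 ++ "()") (String.ofList (pvSeq (pvToPats l₁) s₀))
            then ((PySem.Str.replace (String.ofList (pvSeq (pvToPats l₁) s₀))
                    ("." ++ mp.1 ++ "()")
                    (if PySem.Str.startswith mp.2 "len(" then "." ++ mp.2 else "." ++ mp.2)),
                  acc ++ ["Converted " ++ mp.1 ++ "() to " ++ mp.2])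
            else (String.ofList (pvSeq (pvToPats l₁) s₀), acc)) = _
        rw [hcond, hc, if_pos rfl, ite_self]
        refine Prod.ext ?_ rfl
        show PySem.Str.replace _ _ _ = _
        rw [show ∀ a b c : String, PySem.Str.replace a b c
            = String.ofList (PySem.Chars.replace a.toList b.toList c.toList)
            from fun _ _ _ => rfl]
        rw [hX, show ("." ++ mp.1 ++ "()").toList = pvCPat mp from rfl,
          show ("." ++ mp.2).toList = pvCRep mp from rfl,
          pvReplace_eq_rep _ _ (pvCPat_ne mp), hseqstep]
      rw [hstep, ih (l₁ ++ [mp]) hconv' s₀ (acc ++ [pvTag mp])]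
      rw [List.append_assoc l₁ [mp] rest]
      simp [hc, pvTag]
    | false =>
      have hstep : pvStepA (String.ofList (pvSeq (pvToPats l₁) s₀), acc) mp
          = (String.ofList (pvSeq (pvToPats (l₁ ++ [mp])) s₀), acc) := by
        show (if PySem.Str.isIn ("." ++ mp.1 ++ "()") (String.ofList (pvSeq (pvToPats l₁) s₀))
            then ((PySem.Str.replace (String.ofList (pvSeq (pvToPats l₁) s₀))
                    ("." ++ mp.1 ++ "()")
                    (if PySem.Str.startswith mp.2 "len(" then "." ++ mp.2 else "." ++ mp.2)),
                  acc ++ ["Converted " ++ mp.1 ++ "() to " ++ mp.2])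
            else (String.ofList (pvSeq (pvToPats l₁) s₀), acc)) = _
        rw [hcond, hc, if_neg (by simp)]
        refine Prod.ext ?_ rfl
        show String.ofList (pvSeq (pvToPats l₁) s₀) = _
        rw [hseqstep, pvRep_id _ _ _ (by
          rw [pvHas_seq_pres (pvToPats l₁) (pvCPat mp) (pvCPat_ne mp) hQ1.2.1 hQ1.2.2.2 hpres]
          exact hc)]
      rw [hstep, ih (l₁ ++ [mp]) hconv' s₀ acc]
      rw [List.append_assoc l₁ [mp] rest]
      simp [hc]

-- ===== VERDICT (by name: the statement is the Claim_ definition above) =====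
theorem fix_property_methods_py_spec : Claim_equal_fix_property_methods_py := by
  intro code _
  unfold Spec_fix_property_methods_py
  have hA : fix_property_methods_py code = List.foldl pvStepA (code, []) pvConvs := rfl
  have h0 : (code, ([] : List String))
      = (String.ofList (pvSeq (pvToPats []) code.toList), ([] : List String)) := by
    simp [pvToPats, pvSeq]
  rw [hA, h0, pvFoldA_spec pvConvs [] rfl code.toList []]
  show (String.ofList (pvSeq (pvToPats ([] ++ pvConvs)) code.toList),
        [] ++ (pvConvs.filter (fun mp => pvHas (pvCPat mp) code.toList)).map pvTag)
      = fix_property_methods_py_alt code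
  unfold fix_property_methods_py_alt
  simp only [List.nil_append]
  refine Prod.ext ?_ ?_
  · show String.ofList (pvSeq pvPats code.toList) = _
    rw [pvSeq_eq_scan]
  · show (pvConvs.filter (fun mp => pvHas (pvCPat mp) code.toList)).map pvTag = _
    have hfil : ∀ mp ∈ pvConvs, pvHas (pvCPat mp) code.toList
        = PySem.Str.isIn ("." ++ mp.1 ++ "()") code := by
      intro mp _
      rw [show PySem.Str.isIn ("." ++ mp.1 ++ "()") code
          = PySem.Chars.isIn (pvCPat mp) code.toList from rfl,
        pvIsIn_eq_has _ _ (pvCPat_ne mp)]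
    rw [List.filter_congr hfil]
    rfl
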